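-- pv_equiv track=rewrite | github.com/baoy-nlp/DSS-VAE | dss_vae/preprocess/tree_linearization.py | tree_to_s2t
-- ===== SOURCE A (Python) =====
-- def tree_to_s2t(tree_str):
--     """
--     linearized the phrase tree to token sequences.
--     Args:
--         tree_str:(TOP (NP (NNP EDUCATION) (NNPS ADS) (: :)))
--
--     Return:
--         s2t format:
--             words: EDUCATION ADS :
--             tokens: NP NNP NNPS : /NP
--     """
--     stack, tokens, words = [], [], []
--     for tok in tree_str.strip().split():
--         if len(tok) >= 2:
--             if tok[0] == "(":
--                 symbol = tok[1:]
--                 tokens.append(symbol)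
--                 stack.append(symbol)
--             else:
--                 assert tok[-1] == ")"
--                 stack.pop()  # Pop the POS-tag.
--                 while tok[-2] == ")":
--                     tokens.append("/" + stack.pop())
--                     tok = tok[:-1]
--                 words.append(tok[:-1])
--     return str.join(" ", words), str.join(" ", tokens[1:-1])  # Strip "TOP" tag.
-- ===== SOURCE B (Python) =====
-- def tree_to_s2t(tree_str):
--     """Two-pass re-implementation: parse the tokens into an explicit nested
--     tree (recursive descent), then traverse it, emitting each symbol on entry
--     and /symbol on exit; finally strip the outer (TOP) tag positionally."""
--     # Pass 0: tokenize into atomic events.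
--     # A node symbol token "(SYM" -> ("open", SYM).
--     # A leaf token "WORD)))..." -> ("word", WORD), one silent close (the
--     # POS tag level, which gets no /tag), and tagged closes for the rest.
--     events = []
--     for tok in tree_str.strip().split():
--         if len(tok) < 2:
--             continue
--         if tok[0] == "(":
--             events.append(("open", tok[1:]))
--         else:
--             word = tok.rstrip(")")
--             k = len(tok) - len(word)
--             events.append(("word", word))
--             events.append(("close", False))          # silent close
--             events.extend([("close", True)] * (k - 1))  # tagged closes
--
--     # Pass 1: recursive-descent parse into a forest.
--     # tree   := ("leaf", word) | ("node", sym, children, close)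
--     # close  := None (never closed) | False (silent) | True (tagged)
--     def parse(i):
--         """Parse a forest starting at event i; return (children, close, next_i):
--         close is the kind of the close event that ended this forest (None at
--         end of input)."""
--         children = []
--         while i < len(events):
--             ev = events[i]
--             if ev[0] == "open":
--                 kids, close, i = parse(i + 1)
--                 children.append(("node", ev[1], kids, close))
--             elif ev[0] == "word":
--                 children.append(("leaf", ev[1]))
--                 i += 1
--             else:
--                 return children, ev[1], i + 1
--         return children, None, i
--
--     forest, _, _ = parse(0)
--
--     # Pass 2: traverse, collecting words in order and tags pre/post-order.
--     words, tags = [], []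
--
--     def walk(t):
--         if t[0] == "leaf":
--             words.append(t[1])
--         else:
--             _, sym, kids, close = t
--             tags.append(sym)
--             for c in kids:
--                 walk(c)
--             if close is True:
--                 tags.append("/" + sym)
--
--     for t in forest:
--         walk(t)
--
--     return " ".join(words), " ".join(tags[1:-1])  # strip the outer tag by position
-- ===== Notes on version B (the rewrite author's own statement) =====
-- stated objective: alternative
-- what changed: Replaces A's single stack scan that interleaves tag emission with parsing by a build-then-traverse pair of passes: tokens are expanded into open/word/close events, a recursive-descent parser builds an explicit nested tree (recording for each node whether it was closed silently by a word's first paren, closed with a tag, or left open), and a separate traversal emits each symbol on entry and /symbol on tagged exit, stripping the outer tag positionally.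
import Mathlib
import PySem

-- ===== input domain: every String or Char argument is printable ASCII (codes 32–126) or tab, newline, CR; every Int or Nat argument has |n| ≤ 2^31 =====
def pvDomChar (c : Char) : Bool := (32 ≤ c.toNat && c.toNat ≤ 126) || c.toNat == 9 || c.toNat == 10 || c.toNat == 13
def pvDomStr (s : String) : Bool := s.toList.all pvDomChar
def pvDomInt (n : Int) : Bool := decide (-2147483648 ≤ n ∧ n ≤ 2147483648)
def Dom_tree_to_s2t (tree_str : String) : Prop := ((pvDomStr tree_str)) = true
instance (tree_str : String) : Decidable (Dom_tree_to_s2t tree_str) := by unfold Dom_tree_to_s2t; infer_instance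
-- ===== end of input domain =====

-- B re-implements the one-pass stack scan as build-then-traverse (tokenize to events,
-- recursive-descent parse into an explicit tree, then a traversal emitting tags/words);
-- objective: alternative decomposition, same asymptotic cost.

-- ===== PORT A =====
-- inner `while tok[-2] == ")"` loop of A; Python raises IndexError where the
-- index is out of range or the stack underflows (such inputs are outside Pre_).
def tsWhile (tok : List Char) (stack tokens : List String) : List Char × List String × List String :=
  if _h : PySem.Raise.InRange tok.length (-2) ∧ PySem.List.pyGetD tok (-2) ' ' = ')' then
    tsWhile tok.dropLast stack.tail (tokens ++ ["/" ++ stack.headD ""])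
  else (tok, stack, tokens)
termination_by tok.length
decreasing_by
  simp [PySem.Raise.InRange] at _h
  have : 2 ≤ tok.length := by omega
  simp [List.length_dropLast]; omega

-- the `for tok in …` loop of A, state (stack, tokens, words); returns (words, tokens).
-- The Python `assert tok[-1] == ")"` raises on failure; such inputs are outside Pre_.
def tsGo : List String → List String → List String → List String → List String × List String
  | [], _, tokens, words => (words, tokens)
  | tok :: rest, stack, tokens, words =>
    let tc := tok.toList
    if 2 ≤ tc.length then
      if tc.headD ' ' = '(' then
        tsGo rest (String.ofList tc.tail :: stack) (tokens ++ [String.ofList tc.tail]) words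
      else
        let r := tsWhile tc stack.tail tokens
        tsGo rest r.2.1 r.2.2 (words ++ [String.ofList r.1.dropLast])
    else tsGo rest stack tokens words

def tree_to_s2t (tree_str : String) : String × String :=
  let r := tsGo (PySem.Str.split₀ (PySem.Str.strip tree_str)) [] [] []
  (PySem.Str.join " " r.1, PySem.Str.join " " (PySem.List.slice r.2 (some 1) (some (-1))))

-- ===== PORT B =====
-- atomic events: open a node, a leaf word, or a close (false = silent POS close, true = tagged)
inductive PvEv
  | op : String → PvEv
  | wd : String → PvEv
  | cl : Bool → PvEv
deriving DecidableEq, Repr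

-- exact hand port of Python tok.rstrip(")") : drop the trailing run of ')'
def pvRstripParen (tc : List Char) : List Char := (tc.reverse.dropWhile (· = ')')).reverse

def pvEvOf (tok : String) : List PvEv :=
  let tc := tok.toList
  if 2 ≤ tc.length then
    if tc.headD ' ' = '(' then [.op (String.ofList tc.tail)]
    else
      let w := pvRstripParen tc
      [.wd (String.ofList w), .cl false] ++ List.replicate (tc.length - w.length - 1) (.cl true)
  else []

def pvEvents (ts : List String) : List PvEv := ts.flatMap pvEvOf

mutual
inductive PvTree
  | leaf : String → PvTree
  | node : String → PvForest → Option Bool → PvTree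
inductive PvForest
  | nil : PvForest
  | cons : PvTree → PvForest → PvForest
end

-- recursive-descent parser (fuel only makes the recursion structural; with
-- fuel > length of the event list it never runs out)
def pvParse : Nat → List PvEv → PvForest × Option Bool × List PvEv
  | 0, ev => (.nil, none, ev)
  | _ + 1, [] => (.nil, none, [])
  | n + 1, .op s :: rest =>
    let p := pvParse n rest
    let q := pvParse n p.2.2
    (.cons (.node s p.1 p.2.1) q.1, q.2.1, q.2.2)
  | n + 1, .wd w :: rest =>
    let p := pvParse n rest
    (.cons (.leaf w) p.1, p.2.1, p.2.2)
  | _ + 1, .cl b :: rest => (.nil, some b, rest)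

mutual
def pvWordsT : PvTree → List String
  | .leaf w => [w]
  | .node _ kids _ => pvWordsF kids
def pvWordsF : PvForest → List String
  | .nil => []
  | .cons t f => pvWordsT t ++ pvWordsF f
end

mutual
def pvTagsT : PvTree → List String
  | .leaf _ => []
  | .node s kids c => s :: (pvTagsF kids ++ if c = some true then ["/" ++ s] else [])
def pvTagsF : PvForest → List String
  | .nil => []
  | .cons t f => pvTagsT t ++ pvTagsF f
end

def tree_to_s2t_alt (tree_str : String) : String × String :=
  let ev := pvEvents (PySem.Str.split₀ (PySem.Str.strip tree_str))
  let p := pvParse (ev.length + 1) ev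
  (PySem.Str.join " " (pvWordsF p.1),
   PySem.Str.join " " (PySem.List.slice (pvTagsF p.1) (some 1) (some (-1))))

-- ===== PRECONDITION & SPEC =====
-- length of the trailing run of ')' of a token
def pvRunLen (tc : List Char) : Nat := (tc.reverse.takeWhile (· = ')')).length

-- a token of length ≥ 2 must open a node or be a word followed by ≥ 1 closing parens
def pvTokOk (t : String) : Bool :=
  let tc := t.toList
  decide (tc.length < 2) || (tc.headD ' ' == '(') ||
    ((tc.getLastD ' ' == ')') && decide (pvRunLen tc < tc.length))

-- bracket-balance counter: closing parens must never outnumber the open nodes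
def pvDepth (d? : Option Nat) (t : String) : Option Nat :=
  d?.bind fun d =>
    let tc := t.toList
    if 2 ≤ tc.length then
      if tc.headD ' ' = '(' then some (d + 1)
      else
        let k := pvRunLen tc
        if k ≤ d then some (d - k) else none
    else some d

-- Pre_ = exactly the inputs on which A returns: every ≥2-char token is an open
-- token or a word with a trailing ')' run shorter than itself (else the assert
-- or `tok[-2]` raises), and closes never underflow the stack (else pop raises).
def Pre_tree_to_s2t (tree_str : String) : Prop :=
  let ts := PySem.Str.split₀ (PySem.Str.strip tree_str)
  ts.all pvTokOk = true ∧ (ts.foldl pvDepth (some 0)).isSome = true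
instance (tree_str : String) : Decidable (Pre_tree_to_s2t tree_str) := by
  unfold Pre_tree_to_s2t; infer_instance

def pvWitness_tree_to_s2t : String := "(TOP (NP (NNP EDUCATION) (NNPS ADS) (: :)))"

def Spec_tree_to_s2t (tree_str : String) (out : String × String) : Prop := out = tree_to_s2t_alt tree_str
instance (tree_str : String) (out : String × String) : Decidable (Spec_tree_to_s2t tree_str out) := by
  unfold Spec_tree_to_s2t; infer_instance

-- ===== CLAIM (what is proved, stated in full; the proofs are below) =====
def Claim_equal_tree_to_s2t : Prop := ∀ (tree_str : String), Dom_tree_to_s2t tree_str → Pre_tree_to_s2t tree_str → Spec_tree_to_s2t tree_str (tree_to_s2t tree_str)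

-- ===== LEMMAS AND PROOFS =====

-- A's event-level machine: the same stack scan, one atomic event at a time
def emGo : List PvEv → List String → List String → List String → List String × List String
  | [], _, tokens, words => (words, tokens)
  | .op s :: r, st, tk, w => emGo r (s :: st) (tk ++ [s]) w
  | .wd x :: r, st, tk, w => emGo r st tk (w ++ [x])
  | .cl b :: r, st, tk, w => emGo r st.tail (tk ++ if b then ["/" ++ st.headD ""] else []) w

-- j pops with tag emission
def popEmit : Nat → List String → List String → List String × List String
  | 0, st, tk => (st, tk)
  | j + 1, st, tk => popEmit j st.tail (tk ++ ["/" ++ st.headD ""])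

theorem tsWhile_unroll (k : Nat) (w : List Char) (st tk : List String)
    (hw : w ≠ []) (hl : w.getLast? ≠ some ')') :
    tsWhile (w ++ List.replicate (k + 1) ')') st tk
      = (w ++ [')'], (popEmit k st tk).1, (popEmit k st tk).2) := by
  induction k generalizing st tk with
  | zero =>
    rw [tsWhile]
    have hwlen : 1 ≤ w.length := by cases w <;> simp_all
    have hlen : (w ++ List.replicate 1 ')').length = w.length + 1 := by simp
    have hget : PySem.List.pyGetD (w ++ List.replicate 1 ')') (-2) ' '
        = (w ++ List.replicate 1 ')')[(w ++ List.replicate 1 ')').length - 2] := by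
      rw [PySem.List.pyGetD_neg_ofNat _ 2 ' ' (by omega) (by omega)]
    have hidx : (w ++ List.replicate 1 ')').length - 2 = w.length - 1 := by omega
    have hval : (w ++ List.replicate 1 ')')[(w ++ List.replicate 1 ')').length - 2]'(by omega)
        = w.getLast hw := by
      rw [List.getElem_append_left (by omega)]
      simp [List.getLast_eq_getElem]
    have hgl : w.getLast hw ≠ ')' := by
      intro he
      have h' : w.getLast? = some (w.getLast hw) := List.getLast?_eq_getLast hw
      exact hl (by rw [h', he])
    rw [dif_neg]
    · simp [popEmit]
    · intro hc
      exact hgl (by rw [← hval, ← hget, hc.2])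
  | succ k ih =>
    rw [tsWhile]
    have hlen : (w ++ List.replicate (k + 1 + 1) ')').length = w.length + k + 2 := by
      simp; omega
    have hget : PySem.List.pyGetD (w ++ List.replicate (k + 1 + 1) ')') (-2) ' ' = ')' := by
      rw [PySem.List.pyGetD_neg_ofNat _ 2 ' ' (by omega) (by omega)]
      simp only [List.length_append, List.length_replicate]
      rw [List.getElem_append_right (by omega)]
      simp
    rw [dif_pos ⟨by simp [PySem.Raise.InRange]; omega, hget⟩]
    have hdrop : (w ++ List.replicate (k + 1 + 1) ')').dropLast = w ++ List.replicate (k + 1) ')' := by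
      rw [List.replicate_succ' (n := k + 1), ← List.append_assoc, List.dropLast_concat]
    rw [hdrop, ih]
    simp [popEmit]

theorem emGo_replicate (j : Nat) (r : List PvEv) (st tk ws : List String) :
    emGo (List.replicate j (.cl true) ++ r) st tk ws
      = emGo r (popEmit j st tk).1 (popEmit j st tk).2 ws := by
  induction j generalizing st tk with
  | zero => simp [popEmit]
  | succ j ih => simp [List.replicate_succ, emGo, popEmit, ih]

theorem rstrip_decomp (tc : List Char) :
    tc = pvRstripParen tc ++ List.replicate (pvRunLen tc) ')' := by
  unfold pvRstripParen pvRunLen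
  conv_lhs => rw [← List.reverse_reverse tc,
    ← List.takeWhile_append_dropWhile (p := fun c => decide (c = ')')) (l := tc.reverse)]
  rw [List.reverse_append]
  congr 1
  rw [List.eq_replicate_iff]
  refine ⟨by simp, ?_⟩
  intro b hb
  rw [List.mem_reverse] at hb
  have := List.mem_takeWhile_imp hb
  simpa using this

theorem rstrip_getLast (tc : List Char) : (pvRstripParen tc).getLast? ≠ some ')' := by
  unfold pvRstripParen
  rw [List.getLast?_reverse]
  intro h
  have hne : tc.reverse.dropWhile (· = ')') ≠ [] := by
    intro he; rw [he] at h; simp at h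
  have := List.head_dropWhile_not (· = ')') hne
  rw [List.head?_eq_head hne] at h
  simp at h this
  exact this h

theorem word_shape (t : String) (hok : pvTokOk t = true)
    (hlen : 2 ≤ t.toList.length) (hhd : ¬ t.toList.headD ' ' = '(') :
    1 ≤ pvRunLen t.toList ∧ pvRunLen t.toList < t.toList.length := by
  unfold pvTokOk at hok
  simp only [Bool.or_eq_true, decide_eq_true_eq, Bool.and_eq_true, beq_iff_eq] at hok
  rcases hok with (h | h) | ⟨hlast, hrun⟩
  · omega
  · exact absurd h hhd
  · refine ⟨?_, hrun⟩
    by_contra hk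
    have hk0 : pvRunLen t.toList = 0 := by omega
    have hd := rstrip_decomp t.toList
    rw [hk0] at hd
    simp only [List.replicate_zero, List.append_nil] at hd
    have hne : t.toList ≠ [] := by
      intro he; rw [he] at hlen; simp at hlen
    have h2 := rstrip_getLast t.toList
    rw [← hd] at h2
    rw [List.getLastD_eq_getLast?, List.getLast?_eq_getLast hne] at hlast
    simp only [Option.getD_some] at hlast
    exact h2 (by rw [List.getLast?_eq_getLast hne, hlast])

theorem tsGo_eq_emGo (ts : List String) (st tk ws : List String)
    (h : ts.all pvTokOk = true) :
    tsGo ts st tk ws = emGo (pvEvents ts) st tk ws := by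
  induction ts generalizing st tk ws with
  | nil => simp [tsGo, pvEvents, emGo]
  | cons t rest ih =>
    simp only [List.all_cons, Bool.and_eq_true] at h
    obtain ⟨hokt, hall⟩ := h
    simp only [pvEvents, List.flatMap_cons]
    by_cases hl2 : 2 ≤ t.toList.length
    · by_cases hhd : t.toList.headD ' ' = '('
      · simp only [tsGo, pvEvOf, if_pos hl2, if_pos hhd, List.cons_append, List.nil_append, emGo]
        exact ih _ _ _ hall
      · obtain ⟨hk1, hkl⟩ := word_shape t hokt hl2 hhd
        have hdec := rstrip_decomp t.toList
        have hlenw : t.toList.length = (pvRstripParen t.toList).length + pvRunLen t.toList := by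
          conv_lhs => rw [hdec]
          simp
        have hw0ne : pvRstripParen t.toList ≠ [] := by
          intro he
          rw [he] at hlenw
          simp only [List.length_nil, Nat.zero_add] at hlenw
          omega
        have hlast := rstrip_getLast t.toList
        have hcnt : t.toList.length - (pvRstripParen t.toList).length - 1
            = pvRunLen t.toList - 1 := by omega
        have hku : pvRunLen t.toList = (pvRunLen t.toList - 1) + 1 := by omega
        have hwhile := tsWhile_unroll (pvRunLen t.toList - 1) (pvRstripParen t.toList)
          st.tail tk hw0ne hlast
        simp only [tsGo, pvEvOf, if_pos hl2, if_neg hhd, hcnt, List.cons_append, List.nil_append,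
          emGo, if_neg (Bool.false_ne_true), List.append_nil]
        conv_lhs => rw [hdec, hku, hwhile]
        rw [emGo_replicate]
        simp only [List.dropLast_concat]
        exact ih _ _ _ hall
    · simp only [tsGo, pvEvOf, if_neg hl2, List.nil_append]
      exact ih _ _ _ hall

theorem pvParse_len (n : Nat) (ev : List PvEv) :
    (pvParse n ev).2.2.length ≤ ev.length := by
  induction n generalizing ev with
  | zero => simp [pvParse]
  | succ n ih =>
    match ev with
    | [] => simp [pvParse]
    | .op s :: rest =>
      have h1 := ih rest
      have h2 := ih (pvParse n rest).2.2
      simp only [pvParse, List.length_cons]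
      omega
    | .wd w :: rest =>
      have h1 := ih rest
      simp only [pvParse, List.length_cons]
      omega
    | .cl b :: rest => simp [pvParse]

theorem pvParse_none_rest (n : Nat) (ev : List PvEv) (h : ev.length < n)
    (hc : (pvParse n ev).2.1 = none) : (pvParse n ev).2.2 = [] := by
  induction n generalizing ev with
  | zero => omega
  | succ n ih =>
    match ev with
    | [] => simp [pvParse]
    | .op s :: rest =>
      have hl := pvParse_len n rest
      simp only [pvParse] at hc ⊢
      exact ih (pvParse n rest).2.2 (by simp at h; omega) hc
    | .wd w :: rest =>
      simp only [pvParse] at hc ⊢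
      exact ih rest (by simp at h; omega) hc
    | .cl b :: rest => simp [pvParse] at hc

-- main correspondence: the stack scan equals parse-then-traverse
theorem emGo_parse (n : Nat) (ev : List PvEv) (st tk ws : List String)
    (h : ev.length < n) :
    emGo ev st tk ws =
      (match (pvParse n ev).2.1 with
       | none => (ws ++ pvWordsF (pvParse n ev).1, tk ++ pvTagsF (pvParse n ev).1)
       | some b => emGo (pvParse n ev).2.2 st.tail
            (tk ++ pvTagsF (pvParse n ev).1 ++ if b then ["/" ++ st.headD ""] else [])
            (ws ++ pvWordsF (pvParse n ev).1)) := by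
  induction n generalizing ev st tk ws with
  | zero => omega
  | succ n ih =>
    match ev with
    | [] => simp [pvParse, emGo, pvWordsF, pvTagsF]
    | .op s :: rest =>
      have hr : rest.length < n := by simp at h; omega
      have hq : (pvParse n rest).2.2.length < n := by
        have := pvParse_len n rest; omega
      have hrest := ih rest (s :: st) (tk ++ [s]) ws hr
      rcases h1 : (pvParse n rest).2.1 with _ | b
      · have hre : (pvParse n rest).2.2 = [] := pvParse_none_rest n rest hr h1
        simp only [h1] at hrest
        simp only [emGo, pvParse, hre, h1]
        rw [hrest]
        have hnil : pvParse n ([] : List PvEv) = (.nil, none, []) := by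
          cases n with
          | zero => omega
          | succ n => simp [pvParse]
        simp [hnil, pvWordsF, pvTagsF, pvWordsT, pvTagsT]
      · simp only [h1] at hrest
        have hnext := ih (pvParse n rest).2.2 st
          (tk ++ [s] ++ pvTagsF (pvParse n rest).1 ++ if b then ["/" ++ s] else [])
          (ws ++ pvWordsF (pvParse n rest).1) hq
        simp only [emGo, pvParse, h1]
        rw [hrest]
        simp only [List.tail_cons, List.headD_cons] at *
        rw [hnext]
        rcases h2 : (pvParse n (pvParse n rest).2.2).2.1 with _ | b2 <;>
          simp [pvWordsF, pvTagsF, pvWordsT, pvTagsT]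
    | .wd w :: rest =>
      have hr : rest.length < n := by simp at h; omega
      have hrest := ih rest st tk (ws ++ [w]) hr
      simp only [emGo, pvParse]
      rw [hrest]
      rcases h1 : (pvParse n rest).2.1 with _ | b <;>
        simp [pvWordsF, pvTagsF, pvWordsT, pvTagsT]
    | .cl b :: rest =>
      simp [emGo, pvParse, pvWordsF, pvTagsF]

def evSafe : Nat → List PvEv → Bool
  | _, [] => true
  | d, .op _ :: r => evSafe (d + 1) r
  | d, .wd _ :: r => evSafe d r
  | d, .cl _ :: r => decide (1 ≤ d) && evSafe (d - 1) r

theorem evSafe_replicate (j : Nat) (d : Nat) (E : List PvEv) (h : j ≤ d) :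
    evSafe d (List.replicate j (.cl true) ++ E) = evSafe (d - j) E := by
  induction j generalizing d with
  | zero => simp
  | succ j ih =>
    simp only [List.replicate_succ, List.cons_append, evSafe]
    have h1 : 1 ≤ d := by omega
    rw [ih (d - 1) (by omega)]
    simp [h1]
    congr 1
    omega

theorem foldl_pvDepth_none (ts : List String) : ts.foldl pvDepth none = none := by
  induction ts with
  | nil => rfl
  | cons t rest ih => simpa [pvDepth] using ih

theorem depth_evSafe (ts : List String) (d : Nat)
    (hok : ts.all pvTokOk = true)
    (hd : (ts.foldl pvDepth (some d)).isSome = true) :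
    evSafe d (pvEvents ts) = true := by
  induction ts generalizing d with
  | nil => simp [pvEvents, evSafe]
  | cons t rest ih =>
    simp only [List.all_cons, Bool.and_eq_true] at hok
    obtain ⟨hokt, hall⟩ := hok
    rw [List.foldl_cons] at hd
    simp only [pvEvents, List.flatMap_cons]
    by_cases hl2 : 2 ≤ t.toList.length
    · by_cases hhd : t.toList.headD ' ' = '('
      · have hstep : pvDepth (some d) t = some (d + 1) := by
          simp only [pvDepth, Option.bind_some, if_pos hl2, if_pos hhd]
        rw [hstep] at hd
        simp only [pvEvOf, if_pos hl2, if_pos hhd, List.cons_append, List.nil_append, evSafe]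
        exact ih (d + 1) hall hd
      · obtain ⟨hk1, hkl⟩ := word_shape t hokt hl2 hhd
        by_cases hkd : pvRunLen t.toList ≤ d
        · have hstep : pvDepth (some d) t = some (d - pvRunLen t.toList) := by
            simp only [pvDepth, Option.bind_some, if_pos hl2, if_neg hhd, if_pos hkd]
          rw [hstep] at hd
          have hdec := rstrip_decomp t.toList
          have hlenw : t.toList.length = (pvRstripParen t.toList).length + pvRunLen t.toList := by
            conv_lhs => rw [hdec]
            simp
          have hcnt : t.toList.length - (pvRstripParen t.toList).length - 1
              = pvRunLen t.toList - 1 := by omega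
          simp only [pvEvOf, if_pos hl2, if_neg hhd, hcnt, List.cons_append, List.nil_append,
            evSafe]
          rw [evSafe_replicate _ _ _ (by omega)]
          have he : d - 1 - (pvRunLen t.toList - 1) = d - pvRunLen t.toList := by omega
          rw [he]
          simp only [Bool.and_eq_true, decide_eq_true_eq]
          exact ⟨by omega, ih _ hall hd⟩
        · have hstep : pvDepth (some d) t = none := by
            simp only [pvDepth, Option.bind_some, if_pos hl2, if_neg hhd, if_neg hkd]
          rw [hstep, foldl_pvDepth_none] at hd
          simp at hd
    · have hstep : pvDepth (some d) t = some d := by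
        simp only [pvDepth, Option.bind_some, if_neg hl2]
      rw [hstep] at hd
      simp only [pvEvOf, if_neg hl2, List.nil_append]
      exact ih d hall hd

theorem parse_ck_safe (n : Nat) (ev : List PvEv) (d : Nat)
    (h : ev.length < n) (hs : evSafe d ev = true) :
    (pvParse n ev).2.1 = none ∨ (1 ≤ d ∧ evSafe (d - 1) (pvParse n ev).2.2 = true) := by
  induction n generalizing ev d with
  | zero => omega
  | succ n ih =>
    match ev with
    | [] => simp [pvParse]
    | .op s :: rest =>
      have hr : rest.length < n := by simp at h; omega
      have hq : (pvParse n rest).2.2.length < n := by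
        have := pvParse_len n rest; omega
      simp only [evSafe] at hs
      rcases ih rest (d + 1) hr hs with h1 | ⟨_, h2⟩
      · have hre : (pvParse n rest).2.2 = [] := pvParse_none_rest n rest hr h1
        simp only [pvParse, hre]
        have : pvParse n ([] : List PvEv) = (.nil, none, []) := by
          cases n with
          | zero => omega
          | succ n => simp [pvParse]
        simp [this]
      · simp only [Nat.add_sub_cancel] at h2
        rcases ih (pvParse n rest).2.2 d hq h2 with h3 | h4
        · simp only [pvParse]
          simp [h3]
        · simp only [pvParse]
          simpa using Or.inr h4
    | .wd w :: rest =>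
      have hr : rest.length < n := by simp at h; omega
      simp only [evSafe] at hs
      simpa [pvParse] using ih rest d hr hs
    | .cl b :: rest =>
      simp only [evSafe, Bool.and_eq_true, decide_eq_true_eq] at hs
      simp [pvParse, hs.1, hs.2]

theorem parse_top_none (ev : List PvEv) (hs : evSafe 0 ev = true) :
    (pvParse (ev.length + 1) ev).2.1 = none := by
  rcases parse_ck_safe (ev.length + 1) ev 0 (Nat.lt_succ_self _) hs with h | ⟨h1, _⟩
  · exact h
  · omega

-- ===== VERDICT (by name: the statement is the Claim_ definition above) =====
theorem tree_to_s2t_spec : Claim_equal_tree_to_s2t := by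
  intro s _hdom hpre
  obtain ⟨hok, hdep⟩ := hpre
  unfold Spec_tree_to_s2t tree_to_s2t tree_to_s2t_alt
  have hsafe := depth_evSafe _ 0 hok hdep
  have hnone := parse_top_none _ hsafe
  have h1 := tsGo_eq_emGo (PySem.Str.split₀ (PySem.Str.strip s)) [] [] [] hok
  have h2 := emGo_parse ((pvEvents (PySem.Str.split₀ (PySem.Str.strip s))).length + 1)
      (pvEvents (PySem.Str.split₀ (PySem.Str.strip s))) [] [] [] (Nat.lt_succ_self _)
  rw [h1, h2]
  simp only [hnone, List.nil_append]
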